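-- pv_equiv track=rewrite | github.com/supernlogn/f-string-deconverter | deconverter.py | deconvert_string
-- ===== SOURCE A (Python) =====
-- def deconvert_string(s, sep_space=1):
--   """Deconverts a f-string of python3.6 and beyond to a simple python string
--      Args:
--         s: f-string to deconvert
--         sep_space: space between commas of format arguments
--      Return:
--         deconverted string in the old python3 string format
--
--         Example: "{alpha}, {beta}, {f(gamma)}"
--           deconverts to
--                  "{}, {}, {}".format(alpha, beta, f(gamma))
--   """
--   in_arg = False
--   in_formating = False
--   special_character = False
--   buffers = {}
--   b1 = "main_string"
--   b2 = "arguments"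
--   buffers[b1] = ""
--   buffers[b2] = ""
--   sep = ',' + ' '*sep_space
--   current_buffer = b1
--
--   for c in s:
--     if c == '\\':
--       special_character = True
--     elif special_character:
--       special_character = False
--     elif c == '{':
--       in_arg = True
--       current_buffer = b1
--     elif c == '}' and in_arg:
--       in_arg = False
--       in_formating = False
--       buffers[b2] += sep
--       current_buffer = b1
--     elif c == ':' and in_arg:
--       current_buffer = b1
--       in_formating = True
--     elif in_formating and in_arg:
--       current_buffer = b1
--     elif in_arg:
--       current_buffer = b2
--     else:
--       current_buffer = b1
--     buffers[current_buffer] += c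
--
--   last_char = ""
--   if not buffers["main_string"] == "":
--     if buffers["main_string"][-1] == '\n':
--       last_char = '\n'
--       buffers["main_string"] = buffers["main_string"][:-1]
--   if not buffers["arguments"] == "":
--     buffers["arguments"] = buffers["arguments"][:-len(sep)]
--
--   if buffers["arguments"] == "":
--     return buffers["main_string"] + last_char
--   else:
--     return buffers["main_string"] + ".format(" + buffers["arguments"] + ")" + last_char
-- ===== SOURCE B (Python) =====
-- def deconvert_string(s, sep_space=1):
--   """Deconvert an f-string to old .format() style.
--
--   Segment-based rewrite: instead of a char-by-char flag machine, scan for the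
--   next delimiter of the current mode, bulk-copy the run between delimiters, and
--   consume whole backslash-escape groups (a run of backslashes plus the escaped
--   char) in one step into the last-used destination."""
--   sep = ',' + ' ' * sep_space
--   main_parts = []
--   arg_parts = []
--   i, n = 0, len(s)
--   mode = 'lit'          # 'lit' | 'expr' | 'spec'
--   arg_dest = False      # did the last emitted text go to the arguments?
--   while i < n:
--     stops = '\\{' if mode == 'lit' else ('\\{}:' if mode == 'expr' else '\\}')
--     j = i
--     while j < n and s[j] not in stops:
--       j += 1
--     if j > i:
--       if mode == 'expr':
--         arg_parts.append(s[i:j])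
--         arg_dest = True
--       else:
--         main_parts.append(s[i:j])
--         arg_dest = False
--     if j >= n:
--       break
--     c = s[j]
--     if c == '\\':
--       k = j
--       while k < n and s[k] == '\\':
--         k += 1
--       group = s[j:k + 1]          # backslash run + escaped char (if any)
--       (arg_parts if arg_dest else main_parts).append(group)
--       i = k + 1
--       continue
--     main_parts.append(c)
--     arg_dest = False
--     if c == '{':
--       if mode == 'lit':
--         mode = 'expr'
--     elif c == '}':
--       arg_parts.append(sep)
--       mode = 'lit'
--     else:                         # ':' in expr mode
--       mode = 'spec'
--     i = j + 1
--   main = ''.join(main_parts)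
--   args = ''.join(arg_parts)
--   last_char = ''
--   if main.endswith('\n'):
--     last_char = '\n'
--     main = main[:-1]
--   if args:
--     args = args[:-len(sep)]
--   if not args:
--     return main + last_char
--   return main + '.format(' + args + ')' + last_char
-- ===== Notes on version B (the rewrite author's own statement) =====
-- stated objective: faster
-- what changed: Replaces A's char-by-char flag machine that grows dict-held strings by repeated quadratic concatenation with a segment scanner that bulk-copies runs between delimiters and whole backslash-escape groups into part lists joined once at the end.
import Mathlib
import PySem

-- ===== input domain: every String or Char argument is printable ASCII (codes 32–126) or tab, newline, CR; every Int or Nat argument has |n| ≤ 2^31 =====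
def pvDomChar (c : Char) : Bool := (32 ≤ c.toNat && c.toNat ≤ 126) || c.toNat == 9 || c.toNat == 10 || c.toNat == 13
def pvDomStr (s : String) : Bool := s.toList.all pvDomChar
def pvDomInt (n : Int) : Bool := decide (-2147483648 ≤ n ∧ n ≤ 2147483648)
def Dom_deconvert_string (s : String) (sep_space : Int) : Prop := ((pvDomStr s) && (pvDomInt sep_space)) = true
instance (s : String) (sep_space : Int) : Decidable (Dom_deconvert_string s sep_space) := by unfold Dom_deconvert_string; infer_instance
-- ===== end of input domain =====

-- B replaces A's char-by-char flag machine by a segment scanner (bulk runs between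
-- delimiters, whole escape groups at once, parts joined at the end); same return value.

-- ===== PORT A =====
-- State of A's loop: in_arg, in_formating, special_character, current_buffer
-- (cur = true means "arguments"), and the two buffers of the dict (fixed keys
-- "main_string" / "arguments", carried as two fields).
structure StA where
  ia : Bool
  fm : Bool
  sp : Bool
  cur : Bool
  main : List Char
  args : List Char

-- buffers[current_buffer] += c
def pushCur (st : StA) (c : Char) : StA :=
  if st.cur then { st with args := st.args ++ [c] } else { st with main := st.main ++ [c] }

-- current_buffer = b1; buffers[b1] += c
def push1 (st : StA) (c : Char) : StA :=
  { st with cur := false, main := st.main ++ [c] }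

-- current_buffer = b2; buffers[b2] += c
def push2 (st : StA) (c : Char) : StA :=
  { st with cur := true, args := st.args ++ [c] }

-- the body of A's for-loop, branch for branch
def stepA (sep : List Char) (st : StA) (c : Char) : StA :=
  if c = '\\' then pushCur { st with sp := true } c
  else if st.sp then pushCur { st with sp := false } c
  else if c = '{' then push1 { st with ia := true } c
  else if c = '}' ∧ st.ia then push1 { st with ia := false, fm := false, args := st.args ++ sep } c
  else if c = ':' ∧ st.ia then push1 { st with fm := true } c
  else if st.fm ∧ st.ia then push1 st c
  else if st.ia then push2 st c
  else push1 st c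

def deconvert_string (s : String) (sep_space : Int) : String :=
  -- sep = ',' + ' '*sep_space  (Python's ' '*n is empty for n ≤ 0, exactly Int.toNat)
  let sep : List Char := ',' :: List.replicate sep_space.toNat ' '
  let st := List.foldl (stepA sep) ⟨false, false, false, false, [], []⟩ s.toList
  -- trailing-newline relocation: buffers["main_string"][-1] is xs[-1], main[:-1] is dropLast
  let lm : List Char × List Char :=
    if st.main ≠ [] then
      if PySem.List.pyGet? st.main (-1) = some '\n' then (['\n'], st.main.dropLast)
      else ([], st.main)
    else ([], st.main)
  -- buffers["arguments"][:-len(sep)] : len(sep) ≥ 1, so xs[:-L] = take (len - L)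
  let args := if st.args ≠ [] then st.args.take (st.args.length - sep.length) else st.args
  if args = [] then String.ofList (lm.2 ++ lm.1)
  else String.ofList (lm.2 ++ ".format(".toList ++ args ++ [')'] ++ lm.1)

-- ===== PORT B =====
inductive BMode where
  | lit | expr | spec
deriving DecidableEq

-- the delimiter set of each mode ("stops" in Source B)
def isStop : BMode → Char → Bool
  | .lit,  c => c == '\\' || c == '{'
  | .expr, c => c == '\\' || c == '{' || c == '}' || c == ':'
  | .spec, c => c == '\\' || c == '}'

-- termination facts for bLoop (cited by its decreasing_by)
theorem bLoop_dec2 (mode : BMode) (rest : List Char) (c : Char) (tl : List Char)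
    (hr : rest.dropWhile (fun c => !isStop mode c) = c :: tl) :
    tl.length < rest.length := by
  have h1 : (rest.dropWhile (fun c => !isStop mode c)).length ≤ rest.length :=
    (List.dropWhile_sublist _).length_le
  rw [hr] at h1
  simp at h1
  omega

theorem bLoop_dec1 (mode : BMode) (rest : List Char) (c : Char) (tl : List Char)
    (hr : rest.dropWhile (fun c => !isStop mode c) = c :: tl) (hc : c = '\\') :
    (((rest.dropWhile (fun c => !isStop mode c)).dropWhile (· == '\\')).drop 1).length < rest.length := by
  have h1 : (rest.dropWhile (fun c => !isStop mode c)).length ≤ rest.length :=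
    (List.dropWhile_sublist _).length_le
  have h2 : ((c :: tl).dropWhile (· == '\\')).length ≤ tl.length := by
    simp [hc]
    exact (List.dropWhile_sublist _).length_le
  rw [hr] at h1 ⊢
  simp
  simp at h1
  omega

-- Source B's while-loop: take the run up to the next delimiter in bulk, then handle
-- the delimiter (a whole backslash group, or a control char changing the mode).
def bLoop (sep : List Char) (mode : BMode) (argDest : Bool)
    (main args rest : List Char) : List Char × List Char :=
  let pre := rest.takeWhile (fun c => !isStop mode c)
  let r1 := rest.dropWhile (fun c => !isStop mode c)
  let t : List Char × List Char × Bool :=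
    if pre = [] then (main, args, argDest)
    else if mode = BMode.expr then (main, args ++ pre, true)
    else (main ++ pre, args, false)
  match hr : r1 with
  | [] => (t.1, t.2.1)
  | c :: tl =>
    if hc : c = '\\' then
      -- escape group: the backslash run plus the escaped char, into the last destination
      let t2 := r1.dropWhile (· == '\\')
      let group := r1.takeWhile (· == '\\') ++ t2.take 1
      if t.2.2 then bLoop sep mode t.2.2 t.1 (t.2.1 ++ group) (t2.drop 1)
      else bLoop sep mode t.2.2 (t.1 ++ group) t.2.1 (t2.drop 1)
    else if c = '{' then
      bLoop sep (if mode = BMode.lit then BMode.expr else mode) false (t.1 ++ [c]) t.2.1 tl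
    else if c = '}' then
      bLoop sep BMode.lit false (t.1 ++ [c]) (t.2.1 ++ sep) tl
    else
      bLoop sep BMode.spec false (t.1 ++ [c]) t.2.1 tl
termination_by rest.length
decreasing_by
  · exact bLoop_dec1 mode rest c tl hr hc
  · exact bLoop_dec1 mode rest c tl hr hc
  · exact bLoop_dec2 mode rest c tl hr
  · exact bLoop_dec2 mode rest c tl hr
  · exact bLoop_dec2 mode rest c tl hr

def deconvert_string_alt (s : String) (sep_space : Int) : String :=
  let sep : List Char := ',' :: List.replicate sep_space.toNat ' '
  let ma := bLoop sep BMode.lit false [] [] s.toList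
  -- main.endswith('\n')  (exact: a one-char suffix test)
  let lm : List Char × List Char :=
    if PySem.Chars.endswith ma.1 ['\n'] then (['\n'], ma.1.dropLast) else ([], ma.1)
  let args := if ma.2 ≠ [] then ma.2.take (ma.2.length - sep.length) else ma.2
  if args = [] then String.ofList (lm.2 ++ lm.1)
  else String.ofList (lm.2 ++ ".format(".toList ++ args ++ [')'] ++ lm.1)

-- ===== PRECONDITION & SPEC =====
def Spec_deconvert_string (s : String) (sep_space : Int) (out : String) : Prop := out = deconvert_string_alt s sep_space
instance (s : String) (sep_space : Int) (out : String) : Decidable (Spec_deconvert_string s sep_space out) := by unfold Spec_deconvert_string; infer_instance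

-- ===== CLAIM (what is proved, stated in full; the proofs are below) =====
def Claim_equal_deconvert_string : Prop := ∀ (s : String) (sep_space : Int), Dom_deconvert_string s sep_space → Spec_deconvert_string s sep_space (deconvert_string s sep_space)

-- ===== LEMMAS AND PROOFS =====

-- the two flag bits of A that a B-mode stands for
def flag1 : BMode → Bool
  | .lit => false | .expr => true | .spec => true
def flag2 : BMode → Bool
  | .lit => false | .expr => false | .spec => true

-- folding A's step over a run without delimiters of the current mode
theorem runA (sep : List Char) (mode : BMode) :
    ∀ (l : List Char), (∀ c ∈ l, isStop mode c = false) →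
    ∀ (argDest : Bool) (main args : List Char),
    List.foldl (stepA sep) ⟨flag1 mode, flag2 mode, false, argDest, main, args⟩ l =
      if mode = BMode.expr then
        ⟨flag1 mode, flag2 mode, false, (if l = [] then argDest else true), main, args ++ l⟩
      else
        ⟨flag1 mode, flag2 mode, false, (if l = [] then argDest else false), main ++ l, args⟩ := by
  intro l
  induction l with
  | nil => intro _ ad main args; cases mode <;> simp
  | cons c l ih =>
    intro h ad main args
    have hc : isStop mode c = false := h c (by simp)
    have hl : ∀ d ∈ l, isStop mode d = false := fun d hd => h d (by simp [hd])
    simp only [List.foldl_cons]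
    cases mode with
    | lit =>
      have e1 : ¬ c = '\\' := fun e => by simp [isStop, e] at hc
      have e2 : ¬ c = '{' := fun e => by simp [isStop, e] at hc
      have hs : stepA sep ⟨flag1 BMode.lit, flag2 BMode.lit, false, ad, main, args⟩ c
          = ⟨flag1 BMode.lit, flag2 BMode.lit, false, false, main ++ [c], args⟩ := by
        simp [stepA, push1, flag1, flag2, e1, e2]
      rw [hs, ih hl]
      simp
    | expr =>
      have e1 : ¬ c = '\\' := fun e => by simp [isStop, e] at hc
      have e2 : ¬ c = '{' := fun e => by simp [isStop, e] at hc
      have e3 : ¬ c = '}' := fun e => by simp [isStop, e] at hc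
      have e4 : ¬ c = ':' := fun e => by simp [isStop, e] at hc
      have hs : stepA sep ⟨flag1 BMode.expr, flag2 BMode.expr, false, ad, main, args⟩ c
          = ⟨flag1 BMode.expr, flag2 BMode.expr, false, true, main, args ++ [c]⟩ := by
        simp [stepA, push2, flag1, flag2, e1, e2, e3, e4]
      rw [hs, ih hl]
      simp
    | spec =>
      have e1 : ¬ c = '\\' := fun e => by simp [isStop, e] at hc
      have e2 : ¬ c = '}' := fun e => by simp [isStop, e] at hc
      have hs : stepA sep ⟨flag1 BMode.spec, flag2 BMode.spec, false, ad, main, args⟩ c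
          = ⟨flag1 BMode.spec, flag2 BMode.spec, false, false, main ++ [c], args⟩ := by
        by_cases h1 : c = '{'
        · simp [stepA, push1, flag1, flag2, h1]
        · by_cases h2 : c = ':'
          · simp [stepA, push1, flag1, flag2, h2]
          · simp [stepA, push1, flag1, flag2, e1, e2, h1, h2]
      rw [hs, ih hl]
      simp

-- folding A's step over a run of backslashes: everything lands in the current buffer
theorem escRunA (sep : List Char) :
    ∀ (l : List Char), (∀ c ∈ l, c = '\\') → ∀ (st : StA),
    List.foldl (stepA sep) st l =
      { st with sp := (if l = [] then st.sp else true),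
                main := if st.cur then st.main else st.main ++ l,
                args := if st.cur then st.args ++ l else st.args } := by
  intro l
  induction l with
  | nil => intro _ st; simp
  | cons c l ih =>
    intro h st
    have hc : c = '\\' := h c (by simp)
    have hl : ∀ d ∈ l, d = '\\' := fun d hd => h d (by simp [hd])
    simp only [List.foldl_cons]
    have hs : stepA sep st c = pushCur { st with sp := true } c := by simp [stepA, hc]
    rw [hs, ih hl]
    cases st with
    | mk ia fm sp cur main args => cases cur <;> simp [pushCur]

-- the escaped char after a backslash goes to the current buffer, flags untouched
theorem escStepA (sep : List Char) (st : StA) (c : Char) (hc : c ≠ '\\') (hsp : st.sp = true) :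
    stepA sep st c = pushCur { st with sp := false } c := by
  simp [stepA, hc, hsp]

-- core equivalence of the two loops
theorem coreEq (sep : List Char) :
    ∀ (n : Nat) (rest : List Char), rest.length ≤ n →
    ∀ (mode : BMode) (argDest : Bool) (main args : List Char),
    bLoop sep mode argDest main args rest =
      ((List.foldl (stepA sep) ⟨flag1 mode, flag2 mode, false, argDest, main, args⟩ rest).main,
       (List.foldl (stepA sep) ⟨flag1 mode, flag2 mode, false, argDest, main, args⟩ rest).args) := by
  intro n
  induction n with
  | zero =>
    intro rest hlen mode ad main args
    have h0 : rest = [] := by cases rest <;> simp_all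
    subst h0
    rw [bLoop]
    simp
  | succ n ih =>
    intro rest hlen mode ad main args
    have hpre : ∀ d ∈ rest.takeWhile (fun c => !isStop mode c), isStop mode d = false := by
      intro d hd
      have := List.mem_takeWhile_imp hd
      simpa using this
    have hsplit : rest.takeWhile (fun c => !isStop mode c) ++ rest.dropWhile (fun c => !isStop mode c) = rest :=
      List.takeWhile_append_dropWhile
    have hA : List.foldl (stepA sep) ⟨flag1 mode, flag2 mode, false, ad, main, args⟩ rest
        = List.foldl (stepA sep)
            (List.foldl (stepA sep) ⟨flag1 mode, flag2 mode, false, ad, main, args⟩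
              (rest.takeWhile (fun c => !isStop mode c)))
            (rest.dropWhile (fun c => !isStop mode c)) := by
      rw [← List.foldl_append, hsplit]
    rw [bLoop]
    simp only []
    rw [hA, runA sep mode _ hpre]
    have hst : (if mode = BMode.expr then
          (⟨flag1 mode, flag2 mode, false,
            (if rest.takeWhile (fun c => !isStop mode c) = [] then ad else true), main,
            args ++ rest.takeWhile (fun c => !isStop mode c)⟩ : StA)
        else
          ⟨flag1 mode, flag2 mode, false,
            (if rest.takeWhile (fun c => !isStop mode c) = [] then ad else false),
            main ++ rest.takeWhile (fun c => !isStop mode c), args⟩)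
        = (⟨flag1 mode, flag2 mode, false,
            (if rest.takeWhile (fun c => !isStop mode c) = [] then (main, args, ad)
             else if mode = BMode.expr then (main, args ++ rest.takeWhile (fun c => !isStop mode c), true)
             else (main ++ rest.takeWhile (fun c => !isStop mode c), args, false)).2.2,
            (if rest.takeWhile (fun c => !isStop mode c) = [] then (main, args, ad)
             else if mode = BMode.expr then (main, args ++ rest.takeWhile (fun c => !isStop mode c), true)
             else (main ++ rest.takeWhile (fun c => !isStop mode c), args, false)).1,
            (if rest.takeWhile (fun c => !isStop mode c) = [] then (main, args, ad)
             else if mode = BMode.expr then (main, args ++ rest.takeWhile (fun c => !isStop mode c), true)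
             else (main ++ rest.takeWhile (fun c => !isStop mode c), args, false)).2.1⟩ : StA) := by
      cases mode <;> split_ifs <;> simp_all [-List.takeWhile_eq_nil_iff]
    rw [hst]
    generalize (if rest.takeWhile (fun c => !isStop mode c) = [] then (main, args, ad)
             else if mode = BMode.expr then (main, args ++ rest.takeWhile (fun c => !isStop mode c), true)
             else (main ++ rest.takeWhile (fun c => !isStop mode c), args, false)) = t
    obtain ⟨m1, a1, d1⟩ := t
    simp only []
    -- case on what follows the run
    split
    · -- dropWhile = []
      next hr1 => rw [hr1]; simp
    · -- dropWhile = c :: tl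
      next c tl hr1 =>
      rw [hr1]
      have hlen1 : (c :: tl).length ≤ rest.length := by
        rw [← hr1]; exact (List.dropWhile_sublist _).length_le
      have hstop : isStop mode c = true := by
        have := List.head?_dropWhile_not (p := fun c => !isStop mode c) (l := rest)
        rw [hr1] at this
        simpa using this
      by_cases hc : c = '\\'
      · -- escape group
        rw [dif_pos hc]
        have hbs : (c :: tl).takeWhile (· == '\\') = c :: tl.takeWhile (· == '\\') := by
          simp [hc]
        have ht2 : (c :: tl).dropWhile (· == '\\') = tl.dropWhile (· == '\\') := by
          simp [hc]
        have hbsall : ∀ d ∈ (c :: tl).takeWhile (· == '\\'), d = '\\' := by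
          intro d hd
          have := List.mem_takeWhile_imp hd
          simpa using this
        have hsplit2 : (c :: tl).takeWhile (· == '\\') ++ (c :: tl).dropWhile (· == '\\') = c :: tl :=
          List.takeWhile_append_dropWhile
        have hA2 : List.foldl (stepA sep) (⟨flag1 mode, flag2 mode, false, d1, m1, a1⟩ : StA) (c :: tl)
            = List.foldl (stepA sep)
                (List.foldl (stepA sep) ⟨flag1 mode, flag2 mode, false, d1, m1, a1⟩
                  ((c :: tl).takeWhile (· == '\\')))
                ((c :: tl).dropWhile (· == '\\')) := by
          rw [← List.foldl_append, hsplit2]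
        rw [hA2, escRunA sep _ hbsall]
        have hbne : (c :: tl).takeWhile (· == '\\') ≠ [] := by rw [hbs]; simp
        cases ht2' : (c :: tl).dropWhile (· == '\\') with
        | nil =>
          -- escape run to the end of the string
          simp only [List.take_nil, List.drop_nil, List.append_nil, List.foldl_nil]
          have hnil : ∀ (ad : Bool) (m a : List Char), bLoop sep mode ad m a [] = (m, a) := by
            intro ad m a; rw [bLoop]; simp
          cases d1 <;> simp [hnil]
        | cons d t2' =>
          have hd : ¬ (d == '\\') = true := by
            have := List.head?_dropWhile_not (p := (· == '\\')) (l := c :: tl)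
            rw [ht2'] at this
            simpa using this
          have hd' : d ≠ '\\' := by simpa using hd
          simp only [List.take_succ_cons, List.take_zero, List.drop_succ_cons, List.drop_zero,
            List.foldl_cons]
          have hlen2 : t2'.length ≤ n := by
            have h1 : ((c :: tl).dropWhile (· == '\\')).length ≤ tl.length := by
              rw [ht2]; exact (List.dropWhile_sublist _).length_le
            rw [ht2'] at h1
            simp at h1 hlen1
            omega
          rw [escStepA sep _ d hd' (by simp [hbne])]
          cases hd1 : d1 <;>
            simp [pushCur, ih t2' hlen2 mode, List.append_assoc]
      · -- a control character: '{', '}' or ':'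
        rw [dif_neg hc]
        simp only [List.foldl_cons]
        cases mode with
        | lit =>
          have hcb : c = '{' := by
            simp [isStop, hc] at hstop; exact hstop
          have hlen2 : tl.length ≤ n := by simp at hlen1; omega
          have hs : stepA sep (⟨flag1 BMode.lit, flag2 BMode.lit, false, d1, m1, a1⟩ : StA) c
              = ⟨flag1 BMode.expr, flag2 BMode.expr, false, false, m1 ++ [c], a1⟩ := by
            simp [stepA, push1, flag1, flag2, hcb]
          rw [if_pos hcb, if_pos rfl, hs, ih tl hlen2 BMode.expr false (m1 ++ [c]) a1]
        | expr =>
          have hlen2 : tl.length ≤ n := by simp at hlen1; omega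
          by_cases hcb : c = '{'
          · have hs : stepA sep (⟨flag1 BMode.expr, flag2 BMode.expr, false, d1, m1, a1⟩ : StA) c
                = ⟨flag1 BMode.expr, flag2 BMode.expr, false, false, m1 ++ [c], a1⟩ := by
              subst hcb; simp [stepA, push1, flag1, flag2]
            rw [if_pos hcb, hs, if_neg (by simp : ¬(BMode.expr = BMode.lit)),
              ih tl hlen2 BMode.expr false (m1 ++ [c]) a1]
          · by_cases hcc : c = '}'
            · have hs : stepA sep (⟨flag1 BMode.expr, flag2 BMode.expr, false, d1, m1, a1⟩ : StA) c
                  = ⟨flag1 BMode.lit, flag2 BMode.lit, false, false, m1 ++ [c], a1 ++ sep⟩ := by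
                simp [stepA, push1, flag1, flag2, hcc]
              rw [if_neg hcb, if_pos hcc, hs, ih tl hlen2 BMode.lit false (m1 ++ [c]) (a1 ++ sep)]
            · have hcd : c = ':' := by
                simp [isStop, hc, hcb, hcc] at hstop; exact hstop
              have hs : stepA sep (⟨flag1 BMode.expr, flag2 BMode.expr, false, d1, m1, a1⟩ : StA) c
                  = ⟨flag1 BMode.spec, flag2 BMode.spec, false, false, m1 ++ [c], a1⟩ := by
                simp [stepA, push1, flag1, flag2, hcd]
              rw [if_neg hcb, if_neg hcc, hs, ih tl hlen2 BMode.spec false (m1 ++ [c]) a1]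
        | spec =>
          have hcc : c = '}' := by
            simp [isStop, hc] at hstop; exact hstop
          have hcb : ¬ c = '{' := by simp [hcc]
          have hlen2 : tl.length ≤ n := by simp at hlen1; omega
          have hs : stepA sep (⟨flag1 BMode.spec, flag2 BMode.spec, false, d1, m1, a1⟩ : StA) c
              = ⟨flag1 BMode.lit, flag2 BMode.lit, false, false, m1 ++ [c], a1 ++ sep⟩ := by
            simp [stepA, push1, flag1, flag2, hcc]
          rw [if_neg hcb, if_pos hcc, hs, ih tl hlen2 BMode.lit false (m1 ++ [c]) (a1 ++ sep)]

-- the trailing-newline split: A's "main[-1] == '\n'" test equals B's endswith test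
theorem lastSplit (m : List Char) :
    (if m ≠ [] then
       (if PySem.List.pyGet? m (-1) = some '\n' then (['\n'], m.dropLast) else (([] : List Char), m))
     else ([], m))
      = (if PySem.Chars.endswith m ['\n'] then (['\n'], m.dropLast) else ([], m)) := by
  induction m using List.reverseRecOn with
  | nil => simp [PySem.Chars.endswith]
  | append_singleton xs x _ =>
    have h1 : PySem.List.pyGet? (xs ++ [x]) (-1) = some x := by
      simp [PySem.List.pyGet?, PySem.List.pyIdx?]
    have h2 : (PySem.Chars.endswith (xs ++ [x]) ['\n'] = true) ↔ x = '\n' := by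
      simp [PySem.Chars.endswith, List.isSuffixOf_iff_suffix]
      constructor
      · rintro ⟨t, ht⟩
        have := congrArg List.getLast? ht
        simpa using this.symm
      · rintro rfl; exact ⟨xs, rfl⟩
    by_cases hx : x = '\n'
    · subst hx; simp [h1, h2.mpr rfl]
    · simp [h1, h2, hx]

-- ===== VERDICT (by name: the statement is the Claim_ definition above) =====
theorem deconvert_string_spec : Claim_equal_deconvert_string := by
  intro s sep_space _
  unfold Spec_deconvert_string deconvert_string deconvert_string_alt
  simp only []
  have hcore := coreEq (',' :: List.replicate sep_space.toNat ' ') s.toList.length s.toList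
    (le_refl _) BMode.lit false [] []
  simp only [flag1, flag2] at hcore
  rw [hcore, lastSplit]
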